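-- pv_equiv track=rewrite | github.com/bayisagit/python-codes | codeforce/robinhood.py | will_have_even_leaves
-- ===== SOURCE A (Python) =====
-- def will_have_even_leaves(t, test_cases):
--     results = []
--
--     for n, k in test_cases:
--         # Calculate total leaves using the sum formula
--         total_leaves = (n * (n + 1)) // 2 - ((n - k) * (n - k + 1)) // 2
--
--         # Check if total leaves is even
--         if total_leaves % 2 == 0:
--             results.append("YES")
--         else:
--             results.append("NO")
--
--     return results
-- ===== SOURCE B (Python) =====
-- # The total number of leaves is the sum of the k consecutive integers
-- # n-k+1 .. n.  Its parity is periodic in both n and k with period 4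
-- # (shifting n or k by 4 changes the sum by an even amount), so the whole
-- # answer is a fixed 4x4 lookup table indexed by (n % 4, k % 4); derivation:
-- # T(m) = m(m+1)/2 is odd iff m % 4 in {1, 2}, and the sum is T(n) - T(n-k).
-- _PARITY_TABLE = [
--     # k%4:   0      1     2     3
--     ["YES", "YES", "NO", "NO"],   # n % 4 == 0
--     ["YES", "NO", "NO", "YES"],   # n % 4 == 1
--     ["YES", "YES", "NO", "NO"],   # n % 4 == 2
--     ["YES", "NO", "NO", "YES"],   # n % 4 == 3
-- ]
--
-- def will_have_even_leaves(t, test_cases):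
--     return [_PARITY_TABLE[n % 4][k % 4] for n, k in test_cases]
-- ===== Notes on version B (the rewrite author's own statement) =====
-- stated objective: alternative
-- what changed: Replaces the per-case difference-of-triangular-numbers arithmetic (two multiplications and floor divisions, subtraction, % 2 test, accumulator loop) with a single precomputed 4x4 lookup table indexed by (n % 4, k % 4), exploiting that the parity of the leaf total is periodic in n and k with period 4; the result list is a comprehension over the table lookups.
import Mathlib
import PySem

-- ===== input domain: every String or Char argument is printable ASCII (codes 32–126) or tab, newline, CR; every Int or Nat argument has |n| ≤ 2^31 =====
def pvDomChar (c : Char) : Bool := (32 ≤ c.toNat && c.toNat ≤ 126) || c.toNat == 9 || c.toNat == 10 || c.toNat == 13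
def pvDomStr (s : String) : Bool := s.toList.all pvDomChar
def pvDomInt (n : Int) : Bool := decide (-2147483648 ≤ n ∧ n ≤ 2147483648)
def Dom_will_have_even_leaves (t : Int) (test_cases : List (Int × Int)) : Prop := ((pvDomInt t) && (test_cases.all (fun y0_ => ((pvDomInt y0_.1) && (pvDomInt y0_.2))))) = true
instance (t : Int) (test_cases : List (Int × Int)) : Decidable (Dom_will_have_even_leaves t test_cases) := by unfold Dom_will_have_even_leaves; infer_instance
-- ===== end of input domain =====

-- B replaces A's per-case triangular-number arithmetic with a precomputed 4x4
-- lookup table indexed by (n % 4, k % 4) (the parity of the leaf total is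
-- 4-periodic in both arguments), mapped over the test cases.

-- ===== PORT A =====
def will_have_even_leaves (t : Int) (test_cases : List (Int × Int)) : List String :=
  test_cases.foldl (fun results p =>
    let n := p.1
    let k := p.2
    let total_leaves :=
      PySem.Int.floordiv (n * (n + 1)) 2 - PySem.Int.floordiv ((n - k) * (n - k + 1)) 2
    if PySem.Int.mod total_leaves 2 == 0 then results ++ ["YES"] else results ++ ["NO"]) []

-- ===== PORT B =====
-- _PARITY_TABLE from Source B
def pvParityTable : List (List String) :=
  [["YES", "YES", "NO", "NO"],
   ["YES", "NO", "NO", "YES"],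
   ["YES", "YES", "NO", "NO"],
   ["YES", "NO", "NO", "YES"]]

-- the indices n % 4 and k % 4 always lie in [0, 4), so both pyGet? are
-- always `some` and the getD defaults never fire (exact port of the
-- never-raising Python indexing).
def will_have_even_leaves_alt (t : Int) (test_cases : List (Int × Int)) : List String :=
  test_cases.map (fun p =>
    ((PySem.List.pyGet? ((PySem.List.pyGet? pvParityTable (PySem.Int.mod p.1 4)).getD [])
        (PySem.Int.mod p.2 4)).getD ""))

-- ===== PRECONDITION & SPEC =====
def Spec_will_have_even_leaves (t : Int) (test_cases : List (Int × Int)) (out : List String) : Prop := out = will_have_even_leaves_alt t test_cases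
instance (t : Int) (test_cases : List (Int × Int)) (out : List String) : Decidable (Spec_will_have_even_leaves t test_cases out) := by unfold Spec_will_have_even_leaves; infer_instance

-- ===== CLAIM (what is proved, stated in full; the proofs are below) =====
def Claim_equal_will_have_even_leaves : Prop := ∀ (t : Int) (test_cases : List (Int × Int)), Dom_will_have_even_leaves t test_cases → Spec_will_have_even_leaves t test_cases (will_have_even_leaves t test_cases)

-- ===== LEMMAS AND PROOFS =====

-- parity of a triangular number: (n*(n+1)) // 2 is odd iff n % 4 ∈ {1,2}
theorem tri_parity (n : Int) :
    (PySem.Int.floordiv (n * (n + 1)) 2) % 2 = (if n % 4 = 1 ∨ n % 4 = 2 then 1 else 0) := by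
  rw [PySem.Int.floordiv_eq_ediv_of_pos (by norm_num)]
  obtain ⟨q, r, hr, hn⟩ : ∃ q r : Int, (0 ≤ r ∧ r < 4) ∧ n = 4 * q + r :=
    ⟨n / 4, n % 4, ⟨Int.emod_nonneg n (by norm_num), Int.emod_lt_of_pos n (by norm_num)⟩,
      by rw [Int.ediv_add_emod]⟩
  subst hn
  have hmod : (4 * q + r) % 4 = r := by omega
  rw [hmod]
  obtain ⟨h0, h1⟩ := hr
  interval_cases r
  · have h : (4 * q + 0) * (4 * q + 0 + 1) = 2 * (8 * q ^ 2 + 2 * q) := by ring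
    rw [h, Int.mul_ediv_cancel_left _ (by norm_num)]
    simp; omega
  · have h : (4 * q + 1) * (4 * q + 1 + 1) = 2 * (8 * q ^ 2 + 6 * q + 1) := by ring
    rw [h, Int.mul_ediv_cancel_left _ (by norm_num)]
    simp; omega
  · have h : (4 * q + 2) * (4 * q + 2 + 1) = 2 * (8 * q ^ 2 + 10 * q + 3) := by ring
    rw [h, Int.mul_ediv_cancel_left _ (by norm_num)]
    simp; omega
  · have h : (4 * q + 3) * (4 * q + 3 + 1) = 2 * (8 * q ^ 2 + 14 * q + 6) := by ring
    rw [h, Int.mul_ediv_cancel_left _ (by norm_num)]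
    simp; omega

-- per test case, A's branch result is exactly B's table lookup
theorem elem_eq (n k : Int) :
    (if PySem.Int.mod (PySem.Int.floordiv (n * (n + 1)) 2
        - PySem.Int.floordiv ((n - k) * (n - k + 1)) 2) 2 == 0
      then ("YES" : String) else "NO")
    = (PySem.List.pyGet? ((PySem.List.pyGet? pvParityTable (PySem.Int.mod n 4)).getD [])
        (PySem.Int.mod k 4)).getD "" := by
  rw [PySem.Int.mod_eq_emod_of_pos (by norm_num),
      PySem.Int.mod_eq_emod_of_pos (a := n) (by norm_num),
      PySem.Int.mod_eq_emod_of_pos (a := k) (by norm_num),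
      Int.sub_emod, tri_parity n, tri_parity (n - k)]
  have hm : (n - k) % 4 = (n % 4 - k % 4) % 4 := Int.sub_emod n k 4
  have ha : 0 ≤ n % 4 ∧ n % 4 < 4 :=
    ⟨Int.emod_nonneg n (by norm_num), Int.emod_lt_of_pos n (by norm_num)⟩
  have hb : 0 ≤ k % 4 ∧ k % 4 < 4 :=
    ⟨Int.emod_nonneg k (by norm_num), Int.emod_lt_of_pos k (by norm_num)⟩
  set a := n % 4 with hadef
  set b := k % 4 with hbdef
  obtain ⟨ha0, ha4⟩ := ha
  obtain ⟨hb0, hb4⟩ := hb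
  clear_value a b
  interval_cases a <;> interval_cases b <;> (rw [hm]; decide)

-- A's accumulator loop produces the mapped list
theorem foldl_map (l : List (Int × Int)) (acc : List String) :
    l.foldl (fun results p =>
      let n := p.1
      let k := p.2
      let total_leaves :=
        PySem.Int.floordiv (n * (n + 1)) 2 - PySem.Int.floordiv ((n - k) * (n - k + 1)) 2
      if PySem.Int.mod total_leaves 2 == 0 then results ++ ["YES"] else results ++ ["NO"]) acc
    = acc ++ l.map (fun p =>
        (PySem.List.pyGet? ((PySem.List.pyGet? pvParityTable (PySem.Int.mod p.1 4)).getD [])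
          (PySem.Int.mod p.2 4)).getD "") := by
  induction l generalizing acc with
  | nil => simp
  | cons p l ih =>
    simp only [List.foldl_cons, List.map_cons]
    rw [ih, ← elem_eq p.1 p.2]
    split_ifs <;> simp

-- ===== VERDICT (by name: the statement is the Claim_ definition above) =====
theorem will_have_even_leaves_spec : Claim_equal_will_have_even_leaves := by
  intro t test_cases _
  unfold Spec_will_have_even_leaves will_have_even_leaves will_have_even_leaves_alt
  simpa using foldl_map test_cases []
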